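-- pv_equiv track=rewrite | github.com/hyungyu-02/Algorithm_PS | hash/pg_의상.py | solution
-- ===== SOURCE A (Python) =====
-- def solution(clothes):
--     cloth_hash = {}
--     for cloth_name, category in clothes:
--         cloth_hash[category] = cloth_hash.get(category, 0) + 1
--
--     answer = 1
--     for k, v in cloth_hash.items():
--         answer *= (v+1)
--
--     return answer - 1
-- ===== SOURCE B (Python) =====
-- def _prod_runs(cats):
--     # cats is sorted, so equal categories are consecutive runs
--     if not cats:
--         return 1
--     c = cats[0]
--     k = 1
--     while k < len(cats) and cats[k] == c:
--         k += 1
--     return (k + 1) * _prod_runs(cats[k:])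
--
--
-- def solution(clothes):
--     return _prod_runs(sorted(c for _, c in clothes)) - 1
-- ===== Notes on version B (the rewrite author's own statement) =====
-- stated objective: alternative
-- what changed: Replaces A's hash-count dict plus a product over dict items by sorting the category list and multiplying (run length + 1) over consecutive equal runs, with no dict at all.
import Mathlib
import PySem

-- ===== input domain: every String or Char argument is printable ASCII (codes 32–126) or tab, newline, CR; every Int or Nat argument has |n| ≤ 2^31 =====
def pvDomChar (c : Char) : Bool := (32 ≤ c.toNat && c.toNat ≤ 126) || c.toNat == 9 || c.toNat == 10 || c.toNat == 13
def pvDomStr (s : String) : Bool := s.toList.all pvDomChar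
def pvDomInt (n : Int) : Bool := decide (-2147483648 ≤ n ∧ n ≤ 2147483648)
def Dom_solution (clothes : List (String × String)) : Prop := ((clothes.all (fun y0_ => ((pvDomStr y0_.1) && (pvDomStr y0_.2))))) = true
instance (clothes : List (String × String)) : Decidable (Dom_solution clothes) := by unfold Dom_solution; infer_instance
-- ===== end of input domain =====

-- B replaces A's hash-count dict by sort + consecutive-run products (alternative decomposition, no dict).

-- ===== PORT A =====
def solution (clothes : List (String × String)) : Int :=
  let cloth_hash : PySem.Dict String Int :=
    clothes.foldl (fun d p => d.insert p.2 (d.getD p.2 0 + 1)) PySem.Dict.empty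
  let answer : Int := cloth_hash.items.foldl (fun ans kv => ans * (kv.2 + 1)) 1
  answer - 1

-- ===== PORT B =====
-- '_prod_runs' of Source B: the head run has length 1 + takeWhile-length (the scan 'while cats[k] == c')
def prodRuns : List String → Int
  | [] => 1
  | c :: t =>
      (((t.takeWhile (fun x => x == c)).length : Int) + 2) * prodRuns (t.dropWhile (fun x => x == c))
termination_by l => l.length
decreasing_by
  simp only [List.length_cons]
  exact Nat.lt_succ_of_le (List.length_dropWhile_le _ _)

def solution_alt (clothes : List (String × String)) : Int :=
  prodRuns (PySem.List.sorted (clothes.map (·.2)) (fun x => x) false) - 1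

-- ===== PRECONDITION & SPEC =====
def Spec_solution (clothes : List (String × String)) (out : Int) : Prop := out = solution_alt clothes
instance (clothes : List (String × String)) (out : Int) : Decidable (Spec_solution clothes out) := by unfold Spec_solution; infer_instance

-- ===== CLAIM (what is proved, stated in full; the proofs are below) =====
def Claim_equal_solution : Prop := ∀ (clothes : List (String × String)), Dom_solution clothes → Spec_solution clothes (solution clothes)

-- ===== LEMMAS AND PROOFS =====

-- A product-accumulating loop is a product over the mapped list.
theorem foldl_mul_succ (l : List (String × Int)) (a : Int) :
    l.foldl (fun ans kv => ans * (kv.2 + 1)) a = a * (l.map (fun kv => kv.2 + 1)).prod := by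
  induction l generalizing a with
  | nil => simp
  | cons x t ih => simp [List.foldl_cons, ih, mul_assoc]

-- On a sorted list, B's run product equals the product of (count + 1) over the distinct elements.
theorem prodRuns_eq_prod_dedup : ∀ (s : List String), s.Pairwise (· ≤ ·) →
    prodRuns s = ((PySem.List.dedup s).map (fun k => ((List.count k s : Nat) : Int) + 1)).prod
  | [], _ => by simp [prodRuns, PySem.List.dedup]
  | c :: t, hs => by
    have hc : ∀ x ∈ t, c ≤ x := (List.pairwise_cons.mp hs).1
    have ht : t.Pairwise (· ≤ ·) := (List.pairwise_cons.mp hs).2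
    have hsplit : t.takeWhile (fun x => x == c) ++ t.dropWhile (fun x => x == c) = t :=
      List.takeWhile_append_dropWhile
    have htkc : ∀ x ∈ t.takeWhile (fun x => x == c), x = c := by
      intro x hx; simpa using List.mem_takeWhile_imp hx
    have hdrp : (t.dropWhile (fun x => x == c)).Pairwise (· ≤ ·) :=
      List.Pairwise.sublist (List.dropWhile_sublist _) ht
    have hdrne : ∀ x ∈ t.dropWhile (fun x => x == c), x ≠ c := by
      intro x hx
      cases hdd : t.dropWhile (fun x => x == c) with
      | nil => rw [hdd] at hx; simp at hx
      | cons d dr' =>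
        have hne : ¬ (t.dropWhile (fun x => x == c) = []) := by rw [hdd]; simp
        have hdne : ((t.dropWhile (fun x => x == c)).head hne == c) = false :=
          List.head_dropWhile_not (fun x => x == c) hne
        have hdne' : d ≠ c := by
          have : (t.dropWhile (fun x => x == c)).head hne = d := by
            simp [hdd]
          rw [this] at hdne; simpa using hdne
        rw [hdd] at hx
        rcases List.mem_cons.mp hx with rfl | hx'
        · exact hdne'
        · have hdx : d ≤ x := by
            rw [hdd] at hdrp
            exact (List.pairwise_cons.mp hdrp).1 x hx'
          have hcd : c ≤ d := hc d (by rw [← hsplit, hdd]; simp)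
          intro hxc; subst hxc
          exact hdne' (le_antisymm hdx hcd)
    have ih := prodRuns_eq_prod_dedup (t.dropWhile (fun x => x == c)) hdrp
    -- head-run count
    have hcnt_tk : List.count c (t.takeWhile (fun x => x == c)) =
        (t.takeWhile (fun x => x == c)).length :=
      List.count_eq_length.mpr (fun b hb => (htkc b hb).symm)
    have hcnt_dr : List.count c (t.dropWhile (fun x => x == c)) = 0 :=
      List.count_eq_zero.mpr (fun h => hdrne c h rfl)
    have hcnt_t : List.count c t = (t.takeWhile (fun x => x == c)).length := by
      conv_lhs => rw [← hsplit]
      rw [List.count_append, hcnt_tk, hcnt_dr]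
      omega
    have hcount_c : List.count c (c :: t) = (t.takeWhile (fun x => x == c)).length + 1 := by
      rw [List.count_cons_self, hcnt_t]
    -- counts of other keys pass through the head run
    have hcount_k : ∀ k ∈ t.dropWhile (fun x => x == c),
        List.count k (c :: t) = List.count k (t.dropWhile (fun x => x == c)) := by
      intro k hk
      have hkc : k ≠ c := hdrne k hk
      have htz : List.count k (t.takeWhile (fun x => x == c)) = 0 :=
        List.count_eq_zero.mpr (fun h => hkc (htkc k h))
      have h1 : List.count k (c :: t) = List.count k t := by
        simp [Ne.symm hkc]
      have h2 : List.count k t = List.count k (t.dropWhile (fun x => x == c)) := by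
        conv_lhs => rw [← hsplit]
        rw [List.count_append, htz, Nat.zero_add]
      rw [h1, h2]
    -- distinct elements: dedup (c :: t) is a permutation of c :: dedup (dropWhile …)
    have hnotin : c ∉ PySem.List.dedup (t.dropWhile (fun x => x == c)) := by
      intro h
      exact hdrne c ((PySem.List.mem_dedup _ _).mp h) rfl
    have hperm : (PySem.List.dedup (c :: t)).Perm
        (c :: PySem.List.dedup (t.dropWhile (fun x => x == c))) := by
      apply (List.perm_ext_iff_of_nodup (PySem.List.nodup_dedup _)
        (List.nodup_cons.mpr ⟨hnotin, PySem.List.nodup_dedup _⟩)).mpr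
      intro x
      rw [PySem.List.mem_dedup, List.mem_cons, List.mem_cons, PySem.List.mem_dedup]
      constructor
      · rintro (rfl | hx)
        · exact Or.inl rfl
        · rw [← hsplit] at hx
          rcases List.mem_append.mp hx with hx | hx
          · exact Or.inl (htkc x hx)
          · exact Or.inr hx
      · rintro (rfl | hx)
        · exact Or.inl rfl
        · refine Or.inr ?_
          rw [← hsplit]
          exact List.mem_append.mpr (Or.inr hx)
    calc prodRuns (c :: t)
        = (((t.takeWhile (fun x => x == c)).length : Int) + 2) *
            prodRuns (t.dropWhile (fun x => x == c)) := by rw [prodRuns]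
      _ = ((c :: PySem.List.dedup (t.dropWhile (fun x => x == c))).map
            (fun k => ((List.count k (c :: t) : Nat) : Int) + 1)).prod := by
          rw [ih, List.map_cons, List.prod_cons, hcount_c]
          have hmc : (PySem.List.dedup (t.dropWhile (fun x => x == c))).map
              (fun k => ((List.count k (c :: t) : Nat) : Int) + 1) =
              (PySem.List.dedup (t.dropWhile (fun x => x == c))).map
              (fun k => ((List.count k (t.dropWhile (fun x => x == c)) : Nat) : Int) + 1) := by
            apply List.map_congr_left
            intro k hk
            rw [hcount_k k ((PySem.List.mem_dedup _ _).mp hk)]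
          rw [hmc]
          push_cast
          ring
      _ = ((PySem.List.dedup (c :: t)).map
            (fun k => ((List.count k (c :: t) : Nat) : Int) + 1)).prod :=
          (List.Perm.prod_eq (hperm.map _)).symm
termination_by s => s.length
decreasing_by
  simp only [List.length_cons]
  exact Nat.lt_succ_of_le (List.length_dropWhile_le _ _)

-- ===== VERDICT (by name: the statement is the Claim_ definition above) =====
theorem solution_spec : Claim_equal_solution := by
  unfold Claim_equal_solution
  intro clothes _
  unfold Spec_solution solution solution_alt
  have h1 : clothes.foldl (fun d p => d.insert p.2 (d.getD p.2 0 + 1)) PySem.Dict.empty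
      = PySem.Dict.counter (clothes.map (·.2)) := by
    rw [← PySem.Dict.foldl_insert_getD_add_one_eq_counter, List.foldl_map]
  simp only [h1, PySem.Dict.items_counter, foldl_mul_succ, List.map_map]
  rw [prodRuns_eq_prod_dedup _ (PySem.List.sorted_pairwise _ _)]
  have hp : (PySem.List.sorted (clothes.map (·.2)) (fun x => x) false).Perm
      (clothes.map (·.2)) := PySem.List.sorted_perm _ _ _
  have hcnt : ∀ k, List.count k (PySem.List.sorted (clothes.map (·.2)) (fun x => x) false)
      = List.count k (clothes.map (·.2)) := fun k => hp.count_eq k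
  have hmc : (PySem.List.dedup (PySem.List.sorted (clothes.map (·.2)) (fun x => x) false)).map
      (fun k => ((List.count k (PySem.List.sorted (clothes.map (·.2)) (fun x => x) false) : Nat) : Int) + 1)
      = (PySem.List.dedup (PySem.List.sorted (clothes.map (·.2)) (fun x => x) false)).map
      (fun k => ((List.count k (clothes.map (·.2)) : Nat) : Int) + 1) := by
    apply List.map_congr_left
    intro k _
    rw [hcnt k]
  rw [hmc]
  have hperm : (PySem.Set.ofList (clothes.map (·.2)) : List String).Perm
      (PySem.List.dedup (PySem.List.sorted (clothes.map (·.2)) (fun x => x) false)) := by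
    apply (List.perm_ext_iff_of_nodup (by rw [← PySem.List.dedup_eq_ofList]; exact PySem.List.nodup_dedup _)
      (PySem.List.nodup_dedup _)).mpr
    intro x
    rw [← PySem.List.dedup_eq_ofList, PySem.List.mem_dedup, PySem.List.mem_dedup,
      PySem.List.mem_sorted]
  rw [(List.Perm.prod_eq (hperm.map _))]
  simp [Function.comp_def]
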